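-- pv_equiv track=rewrite | github.com/dhruva-nu/ProjectMannagee_2 | backend/tools/cpa/engine_tools.py | _compute_ancestors_of_target
-- ===== SOURCE A (Python) =====
-- from typing import Dict, List, Tuple, Optional, Set
--
-- def _compute_ancestors_of_target(nodes: Dict[str, dict], target: str) -> set:
--     # Build reverse graph
--     rev: Dict[str, List[str]] = {k: [] for k in nodes}
--     for v, nd in nodes.items():
--         for u in nd.get("dependencies", []):
--             if u in rev:
--                 rev[v]  # ensure v present
--                 rev[u].append(v)  # u -> v in forward; reverse: v depends on u, so u has child v
--     # Actually we need ancestors: nodes that can reach target; do DFS on reverse edges from target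
--     parents: Dict[str, List[str]] = {k: [] for k in nodes}
--     for v, nd in nodes.items():
--         for u in nd.get("dependencies", []):
--             if v in parents:
--                 parents[v].append(u)
--     anc: set = set()
--     def dfs(u: str):
--         for p in parents.get(u, []):
--             if p not in anc:
--                 anc.add(p)
--                 dfs(p)
--     dfs(target)
--     return anc
-- ===== SOURCE B (Python) =====
-- def _compute_ancestors_of_target(nodes, target):
--     # node -> its dependency list (no reverse graph needed)
--     parents = {k: nd.get("dependencies", []) for k, nd in nodes.items()}
--     anc = set()
--     # explicit stack of pending parent-lists instead of recursion
--     stack = [list(parents.get(target, []))]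
--     while stack:
--         frame = stack[-1]
--         if not frame:
--             stack.pop()
--             continue
--         p = frame.pop(0)
--         if p not in anc:
--             anc.add(p)
--             stack.append(list(parents.get(p, [])))
--     return anc
-- ===== Notes on version B (the rewrite author's own statement) =====
-- stated objective: simpler
-- what changed: B deletes the dead reverse-graph construction, builds the parents map with a single dict comprehension instead of init-then-append loops, and replaces the recursive dfs with an iterative loop over an explicit stack of pending parent-lists (same visit order, no recursion).
import Mathlib
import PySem

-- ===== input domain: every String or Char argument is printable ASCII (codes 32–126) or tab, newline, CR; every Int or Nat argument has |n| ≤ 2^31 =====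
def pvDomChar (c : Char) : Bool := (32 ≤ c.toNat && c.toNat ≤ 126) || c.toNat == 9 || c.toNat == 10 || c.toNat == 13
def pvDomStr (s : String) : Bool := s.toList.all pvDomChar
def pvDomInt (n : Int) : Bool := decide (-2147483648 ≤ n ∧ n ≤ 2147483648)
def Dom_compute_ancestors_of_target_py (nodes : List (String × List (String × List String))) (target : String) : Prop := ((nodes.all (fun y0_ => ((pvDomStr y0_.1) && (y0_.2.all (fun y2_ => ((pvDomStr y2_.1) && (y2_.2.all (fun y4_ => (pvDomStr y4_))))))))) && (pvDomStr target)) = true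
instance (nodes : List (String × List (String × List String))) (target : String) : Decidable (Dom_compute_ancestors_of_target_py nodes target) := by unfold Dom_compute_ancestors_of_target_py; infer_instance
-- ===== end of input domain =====

-- B drops the dead reverse-graph build and replaces the recursive DFS by an explicit
-- stack of pending parent-lists (same visit order); objective: simpler.

-- shared: Python's `nd.get("dependencies", [])`
def pvDeps (nd : List (String × List String)) : List String :=
  PySem.Dict.getD ⟨nd⟩ "dependencies" []

-- totality device only (never exhausted on real runs): 1 + total number of dependency entries
def pvFuel (nodes : List (String × List (String × List String))) : Nat :=
  (nodes.map (fun p => (pvDeps p.2).length)).sum + 1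

-- ===== PORT A =====
-- the recursive `dfs`: the loop over `parents.get(u, [])` is the foldl; the Nat is a
-- totality device only (never exhausted on real runs)
def dfsA (parents : PySem.Dict String (List String)) :
    Nat → List String → PySem.Set String → PySem.Set String
  | 0, _, anc => anc
  | f+1, ps, anc =>
    ps.foldl (fun anc p =>
      if PySem.Set.contains anc p then anc
      else dfsA parents f (parents.getD p []) (PySem.Set.add anc p)) anc

def compute_ancestors_of_target_py (nodes : List (String × List (String × List String))) (target : String) : List String :=
  -- rev = {k: [] for k in nodes}; then the dead reverse-graph fill
  let rev0 : PySem.Dict String (List String) := nodes.foldl (fun d p => d.insert p.1 []) ⟨[]⟩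
  let _rev := nodes.foldl (fun d p =>
    (pvDeps p.2).foldl (fun d u =>
      if d.contains u then d.modify u [] (fun l => l ++ [p.1]) else d) d) rev0
  -- parents = {k: [] for k in nodes}; then append each dependency
  let parents0 : PySem.Dict String (List String) := nodes.foldl (fun d p => d.insert p.1 []) ⟨[]⟩
  let parents := nodes.foldl (fun d p =>
    (pvDeps p.2).foldl (fun d u =>
      if d.contains p.1 then d.modify p.1 [] (fun l => l ++ [u]) else d) d) parents0
  -- anc = set(); dfs(target); return anc
  dfsA parents (pvFuel nodes) (parents.getD target []) PySem.Set.empty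

-- ===== PORT B =====
def pvMaxLen (parents : PySem.Dict String (List String)) : Nat :=
  (parents.items.map (fun p => p.2.length)).foldl max 0

def pvWt (C : Nat) (stack : List (Nat × List String)) : Nat :=
  (stack.map (fun q => q.2.length * C ^ q.1)).sum

-- the while-loop over the explicit stack of pending parent-lists; the two Nats (one step
-- budget, one per frame) are totality devices only — never exhausted on real runs
def machB (parents : PySem.Dict String (List String)) :
    Nat → List (Nat × List String) → PySem.Set String → PySem.Set String
  | 0, _, anc => anc
  | _+1, [], anc => anc
  | s+1, (_, []) :: stack, anc => machB parents s stack anc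
  | s+1, (f, p :: rest) :: stack, anc =>
    if PySem.Set.contains anc p then machB parents s ((f, rest) :: stack) anc
    else
      match f with
      | 0 => machB parents s ((0, rest) :: stack) (PySem.Set.add anc p)
      | g+1 => machB parents s ((g, parents.getD p []) :: (g+1, rest) :: stack) (PySem.Set.add anc p)

def compute_ancestors_of_target_py_alt (nodes : List (String × List (String × List String))) (target : String) : List String :=
  -- parents = {k: nd.get("dependencies", []) for k, nd in nodes.items()}
  let parents : PySem.Dict String (List String) :=
    nodes.foldl (fun d p => d.insert p.1 (pvDeps p.2)) ⟨[]⟩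
  -- stack = [list(parents.get(target, []))]; while stack: …
  let stack0 := [(pvFuel nodes - 1, parents.getD target [])]
  machB parents (2 * pvWt (pvMaxLen parents + 1) stack0 + 1) stack0 PySem.Set.empty

-- ===== PRECONDITION & SPEC =====
-- Pre_ requires the node keys to be pairwise distinct: the Python argument is a dict,
-- and an association list with duplicate keys represents no dict input of A.
def Pre_compute_ancestors_of_target_py (nodes : List (String × List (String × List String))) (target : String) : Prop :=
  (nodes.map Prod.fst).Nodup
instance (nodes : List (String × List (String × List String))) (target : String) : Decidable (Pre_compute_ancestors_of_target_py nodes target) := by unfold Pre_compute_ancestors_of_target_py; infer_instance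

def pvWitness_compute_ancestors_of_target_py : (List (String × List (String × List String))) × String :=
  ([("a", [("dependencies", ["b"])]), ("b", [])], "a")

def Spec_compute_ancestors_of_target_py (nodes : List (String × List (String × List String))) (target : String) (out : List String) : Prop := out = compute_ancestors_of_target_py_alt nodes target
instance (nodes : List (String × List (String × List String))) (target : String) (out : List String) : Decidable (Spec_compute_ancestors_of_target_py nodes target out) := by unfold Spec_compute_ancestors_of_target_py; infer_instance

-- ===== CLAIM (what is proved, stated in full; the proofs are below) =====
def Claim_equal_compute_ancestors_of_target_py : Prop := ∀ (nodes : List (String × List (String × List String))) (target : String), Dom_compute_ancestors_of_target_py nodes target → Pre_compute_ancestors_of_target_py nodes target → Spec_compute_ancestors_of_target_py nodes target (compute_ancestors_of_target_py nodes target)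

-- ===== LEMMAS AND PROOFS =====

-- proof-side names for the two parent maps
def pvPA (nodes : List (String × List (String × List String))) : PySem.Dict String (List String) :=
  nodes.foldl (fun d p =>
    (pvDeps p.2).foldl (fun d u =>
      if d.contains p.1 then d.modify p.1 [] (fun l => l ++ [u]) else d) d)
    (nodes.foldl (fun d p => d.insert p.1 []) ⟨[]⟩)
def pvPB (nodes : List (String × List (String × List String))) : PySem.Dict String (List String) :=
  nodes.foldl (fun d p => d.insert p.1 (pvDeps p.2)) ⟨[]⟩

theorem pv_contains_eq_isSome {κ ν : Type} [BEq κ] (d : PySem.Dict κ ν) (k : κ) :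
    d.contains k = (d.get? k).isSome := by
  rw [Bool.eq_iff_iff]
  simp [PySem.Dict.contains, PySem.Dict.get?, List.any_eq_true, List.find?_isSome]

-- the first-match lookup both parent maps realize
def pvLook (nodes : List (String × List (String × List String))) (u : String) : Option (List String) :=
  (nodes.find? (fun p => p.1 == u)).map (fun p => pvDeps p.2)

-- B's comprehension (and A's `{k: [] for k in nodes}` with g ≡ []) pointwise
theorem pv_fold_insert_get? (g : String × List (String × List String) → List String)
    (u : String) :
    ∀ (ns : List (String × List (String × List String))) (d : PySem.Dict String (List String)),
      (ns.map Prod.fst).Nodup →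
      (ns.foldl (fun d p => d.insert p.1 (g p)) d).get? u
        = ((ns.find? (fun p => p.1 == u)).map g).or (d.get? u) := by
  intro ns
  induction ns with
  | nil => intro d _; simp
  | cons p rest ih =>
    intro d hnd
    simp only [List.map_cons, List.nodup_cons] at hnd
    by_cases hu : p.1 = u
    · have hfind : rest.find? (fun q => q.1 == u) = none := by
        rw [List.find?_eq_none]
        intro q hq
        simp only [beq_iff_eq]
        intro h
        apply hnd.1
        have : q.1 = p.1 := by rw [h, hu]
        exact this ▸ (List.mem_map_of_mem hq)
      simp only [List.foldl_cons, ih _ hnd.2, hfind, List.find?_cons, hu]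
      simp [hu ▸ PySem.Dict.get?_insert_self d p.1 (g p)]
    · have : (p.1 == u) = false := by simp [hu]
      simp only [List.foldl_cons, ih _ hnd.2, List.find?_cons, this]
      rw [PySem.Dict.get?_insert_of_ne _ _ (fun h => hu h.symm)]

-- A's inner `for u in deps: if v in parents: parents[v].append(u)` at a key v that is absent
theorem pv_inner_absent (v : String) (us : List String) (d : PySem.Dict String (List String))
    (h : d.contains v = false) :
    us.foldl (fun d u => if d.contains v then d.modify v [] (fun l => l ++ [u]) else d) d = d := by
  induction us with
  | nil => rfl
  | cons x xs ih => simp [h, ih]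

-- … and at a key v that is present, pointwise
theorem pv_inner_present (v : String) (w : String) :
    ∀ (us : List String) (d : PySem.Dict String (List String)), d.contains v = true →
    (us.foldl (fun d u => if d.contains v then d.modify v [] (fun l => l ++ [u]) else d) d).get? w
      = if w = v then some (d.getD v [] ++ us) else d.get? w := by
  intro us
  induction us with
  | nil =>
    intro d hc
    by_cases hw : w = v
    · subst hw
      rw [pv_contains_eq_isSome] at hc
      obtain ⟨x, hx⟩ := Option.isSome_iff_exists.mp hc
      simp [PySem.Dict.getD, hx]
    · simp [hw]
  | cons x xs ih =>
    intro d hc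
    simp only [List.foldl_cons, hc, if_true]
    rw [ih (d.modify v [] (fun l => l ++ [x]))
      (by rw [pv_contains_eq_isSome, PySem.Dict.modify, PySem.Dict.get?_insert_self]; rfl)]
    by_cases hw : w = v
    · simp [hw, PySem.Dict.modify, PySem.Dict.getD, PySem.Dict.get?_insert_self]
    · simp only [hw, if_false]
      rw [PySem.Dict.modify, PySem.Dict.get?_insert_of_ne _ _ (by exact hw)]

-- A's parents-building fold, pointwise
theorem pv_outerA (u : String) :
    ∀ (ns : List (String × List (String × List String))) (d : PySem.Dict String (List String)),
      (ns.map Prod.fst).Nodup →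
      (ns.foldl (fun d p =>
        (pvDeps p.2).foldl (fun d u =>
          if d.contains p.1 then d.modify p.1 [] (fun l => l ++ [u]) else d) d) d).get? u
      = match ns.find? (fun p => p.1 == u) with
        | some p => if d.contains u then some (d.getD u [] ++ pvDeps p.2) else d.get? u
        | none => d.get? u := by
  intro ns
  induction ns with
  | nil => intro d _; simp
  | cons p rest ih =>
    intro d hnd
    simp only [List.map_cons, List.nodup_cons] at hnd
    simp only [List.foldl_cons]
    set d1 := (pvDeps p.2).foldl (fun d u =>
      if d.contains p.1 then d.modify p.1 [] (fun l => l ++ [u]) else d) d with hd1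
    have hget1 : d1.get? u = if u = p.1 ∧ d.contains p.1 = true
        then some (d.getD p.1 [] ++ pvDeps p.2) else d.get? u := by
      by_cases hc : d.contains p.1 = true
      · rw [hd1, pv_inner_present p.1 u _ d hc]
        by_cases hu : u = p.1 <;> simp [hu, hc]
      · rw [hd1, pv_inner_absent p.1 _ d (by simpa using hc)]
        simp [hc]
    by_cases hv : p.1 = u
    · have hfind : rest.find? (fun q => q.1 == u) = none := by
        rw [List.find?_eq_none]
        intro q hq
        simp only [beq_iff_eq]
        intro h
        apply hnd.1
        have : q.1 = p.1 := by rw [h, hv]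
        exact this ▸ (List.mem_map_of_mem hq)
      rw [ih d1 hnd.2]
      simp only [hfind, List.find?_cons, hv]
      simp only [beq_self_eq_true]
      rw [hget1]
      by_cases hc : d.contains u = true
      · simp [hv, hc]
      · simp only [hv] at hc ⊢
        simp [hc]
    · have hne : (p.1 == u) = false := by simp [fun h => hv h]
      rw [ih d1 hnd.2]
      have hgeq : d1.get? u = d.get? u := by
        rw [hget1, if_neg (by rintro ⟨h, -⟩; exact hv h.symm)]
      have hceq : d1.contains u = d.contains u := by
        rw [pv_contains_eq_isSome, pv_contains_eq_isSome, hgeq]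
      have hdeq : ∀ dflt, d1.getD u dflt = d.getD u dflt := by
        intro dflt; rw [PySem.Dict.getD, PySem.Dict.getD, hgeq]
      simp only [List.find?_cons, hne]
      cases hf : rest.find? (fun q => q.1 == u) with
      | none => simp [hgeq]
      | some q => simp [hceq, hdeq, hgeq]

-- both parent maps agree pointwise
theorem pv_parents_agree (nodes : List (String × List (String × List String)))
    (hnd : (nodes.map Prod.fst).Nodup) (u : String) :
    (nodes.foldl (fun (d : PySem.Dict String (List String)) p =>
        (pvDeps p.2).foldl (fun d u =>
          if d.contains p.1 then d.modify p.1 [] (fun l => l ++ [u]) else d) d)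
      (nodes.foldl (fun (d : PySem.Dict String (List String)) p => d.insert p.1 []) ⟨[]⟩)).get? u
    = (nodes.foldl (fun (d : PySem.Dict String (List String)) p => d.insert p.1 (pvDeps p.2)) ⟨[]⟩).get? u := by
  have hempty : (⟨[]⟩ : PySem.Dict String (List String)).get? u = none := rfl
  have hp0 : (nodes.foldl (fun (d : PySem.Dict String (List String)) p => d.insert p.1 []) ⟨[]⟩).get? u
      = ((nodes.find? (fun p => p.1 == u)).map (fun _ => ([] : List String))).or none := by
    rw [pv_fold_insert_get? (fun _ => []) u nodes _ hnd, hempty]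
  rw [pv_outerA u nodes _ hnd, pv_fold_insert_get? (fun p => pvDeps p.2) u nodes _ hnd, hempty]
  cases hf : nodes.find? (fun p => p.1 == u) with
  | none => simp [hf] at hp0 ⊢; exact hp0
  | some q =>
    simp only [Option.map_some]
    have hc : (nodes.foldl (fun (d : PySem.Dict String (List String)) p => d.insert p.1 []) ⟨[]⟩).contains u = true := by
      rw [pv_contains_eq_isSome, hp0]; simp [hf]
    have hgd : (nodes.foldl (fun (d : PySem.Dict String (List String)) p => d.insert p.1 []) ⟨[]⟩).getD u [] = [] := by
      rw [PySem.Dict.getD, hp0]; simp [hf]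
    simp [hc, hgd]

-- dfs depends on parents only through `parents.get(u, [])`
theorem pv_dfsA_congr (p1 p2 : PySem.Dict String (List String))
    (h : ∀ u, p1.getD u [] = p2.getD u []) :
    ∀ (f : Nat) (ps : List String) (anc : PySem.Set String),
      dfsA p1 f ps anc = dfsA p2 f ps anc := by
  intro f
  induction f with
  | zero => intro ps anc; rfl
  | succ f ih =>
    intro ps
    induction ps with
    | nil => intro anc; rfl
    | cons p rest ihp =>
      intro anc
      have e1 : ∀ (q : PySem.Dict String (List String)) (x : PySem.Set String),
          dfsA q (f+1) (p :: rest) x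
            = dfsA q (f+1) rest (if PySem.Set.contains x p then x
                else dfsA q f (q.getD p []) (PySem.Set.add x p)) := by
        intro q x
        simp only [dfsA, List.foldl_cons]
      rw [e1, e1]
      by_cases hc : PySem.Set.contains anc p
      · simp only [hc, if_true, ihp]
      · simp only [hc, if_false, h p, ih, ihp]

theorem pvGetD_len_le (parents : PySem.Dict String (List String)) (p : String) :
    (parents.getD p []).length ≤ pvMaxLen parents := by
  unfold PySem.Dict.getD PySem.Dict.get? pvMaxLen
  cases hf : parents.items.find? (fun q => q.1 == p) with
  | none => simp
  | some q =>
    have hm := List.mem_of_find?_eq_some hf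
    have := (PySem.List.le_foldl_max ((parents.items.map (fun p => p.2.length))) 0).2
      q.2.length (List.mem_map_of_mem hm)
    simpa using this

-- with enough step budget, the stack machine folds the recursive dfs over its frames
theorem pv_machB_sim (parents : PySem.Dict String (List String)) :
    ∀ (s : Nat) (stack : List (Nat × List String)) (anc : PySem.Set String),
      2 * pvWt (pvMaxLen parents + 1) stack + stack.length ≤ s →
      machB parents s stack anc
        = stack.foldl (fun a fr => dfsA parents (fr.1 + 1) fr.2 a) anc := by
  intro s
  induction s with
  | zero =>
    intro stack anc hb
    cases stack with
    | nil => rfl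
    | cons fr st => simp [List.length_cons] at hb
  | succ s ih =>
    intro stack anc hb
    cases stack with
    | nil => rfl
    | cons fr st =>
      obtain ⟨f, ps⟩ := fr
      have hCpos : 0 < (pvMaxLen parents + 1) ^ f := Nat.pow_pos (Nat.succ_pos _)
      cases ps with
      | nil =>
        simp only [machB]
        rw [ih st anc (by
          simp only [pvWt, List.map_cons, List.sum_cons, List.length_nil, Nat.zero_mul,
            List.length_cons] at hb ⊢
          omega)]
        simp [dfsA]
      | cons p rest =>
        have hwt : pvWt (pvMaxLen parents + 1) ((f, p :: rest) :: st)
            = (rest.length + 1) * (pvMaxLen parents + 1) ^ f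
              + pvWt (pvMaxLen parents + 1) st := by
          simp [pvWt]
        simp only [machB]
        by_cases hc : PySem.Set.contains anc p
        · rw [if_pos hc]
          rw [ih ((f, rest) :: st) anc (by
            have h1 : pvWt (pvMaxLen parents + 1) ((f, rest) :: st)
                = rest.length * (pvMaxLen parents + 1) ^ f
                  + pvWt (pvMaxLen parents + 1) st := by simp [pvWt]
            rw [h1]
            rw [hwt] at hb
            have h2 : (rest.length + 1) * (pvMaxLen parents + 1) ^ f
                = rest.length * (pvMaxLen parents + 1) ^ f
                  + (pvMaxLen parents + 1) ^ f := Nat.succ_mul ..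
            simp only [List.length_cons] at hb ⊢
            omega)]
          simp only [List.foldl_cons, dfsA]
          rw [if_pos hc]
        · rw [if_neg hc]
          cases f with
          | zero =>
            show machB parents s ((0, rest) :: st) (PySem.Set.add anc p)
              = List.foldl (fun a fr => dfsA parents (fr.1 + 1) fr.2 a) anc ((0, p :: rest) :: st)
            rw [ih ((0, rest) :: st) (PySem.Set.add anc p) (by
              have h1 : pvWt (pvMaxLen parents + 1) ((0, rest) :: st)
                  = rest.length * (pvMaxLen parents + 1) ^ 0
                    + pvWt (pvMaxLen parents + 1) st := by simp [pvWt]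
              rw [h1]
              rw [hwt] at hb
              have h2 : (rest.length + 1) * (pvMaxLen parents + 1) ^ 0
                  = rest.length * (pvMaxLen parents + 1) ^ 0
                    + (pvMaxLen parents + 1) ^ 0 := Nat.succ_mul ..
              simp only [List.length_cons, pow_zero] at hb h1 h2 ⊢
              omega)]
            simp only [List.foldl_cons, dfsA]
            rw [if_neg hc]
          | succ g =>
            have hg : 0 < (pvMaxLen parents + 1) ^ g := Nat.pow_pos (Nat.succ_pos _)
            have hlen : (parents.getD p []).length ≤ pvMaxLen parents := pvGetD_len_le parents p
            have hkey : (parents.getD p []).length * (pvMaxLen parents + 1) ^ g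
                + (pvMaxLen parents + 1) ^ g ≤ (pvMaxLen parents + 1) ^ (g + 1) := by
              calc (parents.getD p []).length * (pvMaxLen parents + 1) ^ g
                  + (pvMaxLen parents + 1) ^ g
                  = ((parents.getD p []).length + 1) * (pvMaxLen parents + 1) ^ g :=
                    (Nat.succ_mul ..).symm
                _ ≤ (pvMaxLen parents + 1) * (pvMaxLen parents + 1) ^ g :=
                    Nat.mul_le_mul_right _ (Nat.succ_le_succ hlen)
                _ = (pvMaxLen parents + 1) ^ (g + 1) := (Nat.pow_succ' ..).symm
            show machB parents s ((g, parents.getD p []) :: (g + 1, rest) :: st) (PySem.Set.add anc p)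
              = List.foldl (fun a fr => dfsA parents (fr.1 + 1) fr.2 a) anc ((g + 1, p :: rest) :: st)
            rw [ih ((g, parents.getD p []) :: (g + 1, rest) :: st) (PySem.Set.add anc p) (by
              have h1 : pvWt (pvMaxLen parents + 1)
                    ((g, parents.getD p []) :: (g + 1, rest) :: st)
                  = (parents.getD p []).length * (pvMaxLen parents + 1) ^ g
                    + (rest.length * (pvMaxLen parents + 1) ^ (g + 1)
                      + pvWt (pvMaxLen parents + 1) st) := by simp [pvWt]
              rw [h1]
              rw [hwt] at hb
              have h2 : (rest.length + 1) * (pvMaxLen parents + 1) ^ (g + 1)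
                  = rest.length * (pvMaxLen parents + 1) ^ (g + 1)
                    + (pvMaxLen parents + 1) ^ (g + 1) := Nat.succ_mul ..
              simp only [List.length_cons] at hb ⊢
              omega)]
            simp only [List.foldl_cons, Nat.succ_eq_add_one, dfsA]
            rw [if_neg hc]

-- ===== VERDICT (by name: the statement is the Claim_ definition above) =====
theorem compute_ancestors_of_target_py_spec : Claim_equal_compute_ancestors_of_target_py := by
  intro nodes target _hdom hpre
  unfold Pre_compute_ancestors_of_target_py at hpre
  unfold Spec_compute_ancestors_of_target_py
  have hA : compute_ancestors_of_target_py nodes target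
      = dfsA (pvPA nodes) (pvFuel nodes) ((pvPA nodes).getD target []) PySem.Set.empty := rfl
  have hB : compute_ancestors_of_target_py_alt nodes target
      = machB (pvPB nodes)
          (2 * pvWt (pvMaxLen (pvPB nodes) + 1)
              [(pvFuel nodes - 1, (pvPB nodes).getD target [])] + 1)
          [(pvFuel nodes - 1, (pvPB nodes).getD target [])] PySem.Set.empty := rfl
  have hgd : ∀ u, (pvPA nodes).getD u [] = (pvPB nodes).getD u [] := by
    intro u
    rw [PySem.Dict.getD, PySem.Dict.getD, pvPA, pvPB, pv_parents_agree nodes hpre u]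
  rw [hA, hB, pv_machB_sim (pvPB nodes) _ _ _ (by simp)]
  simp only [List.foldl_cons, List.foldl_nil]
  have hfuel : pvFuel nodes - 1 + 1 = pvFuel nodes := by
    unfold pvFuel; omega
  rw [hfuel, pv_dfsA_congr (pvPA nodes) (pvPB nodes) hgd, hgd target]
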